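-- pv_equiv track=rewrite | github.com/arieshsieh0402/LeetCode-Practice | 2260_minimum_consecutive_cards_to_pick_up.py | minimum_card_pickup_brute_force
-- ===== SOURCE A (Python) =====
-- import math
-- from typing import List
--
-- def minimum_card_pickup_brute_force(cards: List[int]) -> int:
--     min_picked = math.inf
--
--     for left in range(len(cards) - 1):
--         for right in range(left + 1, len(cards)):
--             if cards[left] == cards[right]:
--                 min_picked = min(min_picked, right - left + 1)
--                 break
--
--     return -1 if min_picked == math.inf else min_picked
-- ===== SOURCE B (Python) =====
-- from typing import List
--
-- def minimum_card_pickup_brute_force(cards: List[int]) -> int: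
--     # Single pass: remember the last index where each value was seen.
--     last = {}
--     best = -1
--     for i, c in enumerate(cards):
--         if c in last:
--             d = i - last[c] + 1
--             if best == -1 or d < best:
--                 best = d
--         last[c] = i
--     return best
-- ===== Notes on version B (the rewrite author's own statement) =====
-- stated objective: faster
-- what changed: Replaced the O(n^2) nested scan (for each left, scan right for the first equal card) by a single pass keeping a hash map of each value's last-seen index and taking the minimum gap.
import Mathlib
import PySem

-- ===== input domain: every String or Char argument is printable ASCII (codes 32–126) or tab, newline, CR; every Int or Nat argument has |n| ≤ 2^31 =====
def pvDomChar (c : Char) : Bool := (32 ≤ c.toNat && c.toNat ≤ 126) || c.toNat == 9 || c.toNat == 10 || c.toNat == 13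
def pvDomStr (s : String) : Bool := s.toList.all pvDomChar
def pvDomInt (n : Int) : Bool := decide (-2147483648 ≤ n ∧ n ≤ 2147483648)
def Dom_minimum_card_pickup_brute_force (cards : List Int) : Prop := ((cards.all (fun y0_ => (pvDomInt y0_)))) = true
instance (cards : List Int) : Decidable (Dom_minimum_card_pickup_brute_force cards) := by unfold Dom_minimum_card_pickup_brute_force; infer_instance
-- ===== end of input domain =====

-- B replaces A's O(n^2) nested scan by a single pass with a hash map of each value's
-- last-seen index (asymptotically faster); equal return value on every input.

-- ===== PORT A =====
-- inner 'for right in range(left+1, len(cards))' loop with its break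
def pvInnerA (cards : List Int) (left : Int) (mp : Option Int) : List Int → Option Int
  | [] => mp
  | r :: rs =>
    if PySem.List.pyGet? cards left == PySem.List.pyGet? cards r then
      some (mp.elim (r - left + 1) (fun m => min m (r - left + 1)))
    else pvInnerA cards left mp rs

def minimum_card_pickup_brute_force (cards : List Int) : Int :=
  let mp := (PySem.List.pyRange 0 (PySem.List.len cards - 1) 1).foldl
      (fun mp left =>
        pvInnerA cards left mp (PySem.List.pyRange (left + 1) (PySem.List.len cards) 1)) none
  match mp with
  | none => -1
  | some m => m

-- ===== PORT B =====
-- one step of B's single pass: (last-seen dict, best) updated at (i, c)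
def pvStepB (st : PySem.Dict Int Int × Int) (p : Int × Int) : PySem.Dict Int Int × Int :=
  let best :=
    match st.1.get? p.2 with
    | some j =>
      let d := p.1 - j + 1
      if st.2 == -1 || decide (d < st.2) then d else st.2
    | none => st.2
  (st.1.insert p.2 p.1, best)

def minimum_card_pickup_brute_force_alt (cards : List Int) : Int :=
  ((PySem.List.enumerate cards 0).foldl pvStepB (PySem.Dict.empty, -1)).2

-- ===== PRECONDITION & SPEC =====
def Spec_minimum_card_pickup_brute_force (cards : List Int) (out : Int) : Prop := out = minimum_card_pickup_brute_force_alt cards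
instance (cards : List Int) (out : Int) : Decidable (Spec_minimum_card_pickup_brute_force cards out) := by unfold Spec_minimum_card_pickup_brute_force; infer_instance

-- ===== CLAIM (what is proved, stated in full; the proofs are below) =====
def Claim_equal_minimum_card_pickup_brute_force : Prop := ∀ (cards : List Int), Dom_minimum_card_pickup_brute_force cards → Spec_minimum_card_pickup_brute_force cards (minimum_card_pickup_brute_force cards)

-- ===== LEMMAS AND PROOFS =====

-- 'min' on Option Int where 'none' plays math.inf
def pvOMin (a : Option Int) (b : Option Int) : Option Int :=
  match b with
  | none => a
  | some d => some (a.elim d (fun m => min m d))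

-- distance contributed by one 'left' of A: first matching right, if any
def pvFirstDist (cards : List Int) (left : Int) : Option Int :=
  ((PySem.List.pyRange (left + 1) (PySem.List.len cards) 1).find?
    (fun r => PySem.List.pyGet? cards left == PySem.List.pyGet? cards r)).map (fun r => r - left + 1)

def pvDistsA (cards : List Int) : List Int :=
  (PySem.List.pyRange 0 (PySem.List.len cards - 1) 1).filterMap (pvFirstDist cards)

-- last index of c in p, if any
def pvLastIn (p : List Int) (c : Int) : Option Int :=
  ((PySem.List.enumerate p 0).reverse.find? (fun q => q.2 == c)).map (·.1)

-- the distances B's pass computes while consuming q after prefix p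
def pvDists (p q : List Int) : List Int :=
  match q with
  | [] => []
  | x :: q' =>
    (match pvLastIn p x with
     | some j => [((p.length : Int)) - j + 1]
     | none => []) ++ pvDists (p ++ [x]) q'

def pvDictOf (p : List Int) : PySem.Dict Int Int :=
  (PySem.List.enumerate p 0).foldl (fun d pr => d.insert pr.2 pr.1) PySem.Dict.empty

def pvBmin (b d : Int) : Int := if b == -1 || decide (d < b) then d else b

-- matching pair of positions in cards
def pvP (cards : List Int) (j i : Int) : Prop :=
  0 ≤ j ∧ j < i ∧ i < (cards.length : Int) ∧
    PySem.List.pyGet? cards j = PySem.List.pyGet? cards i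

-- ---- generic option-min facts ----
lemma pvOMin_none_left (b : Option Int) : pvOMin none b = b := by
  cases b <;> rfl

lemma pvOMin_assoc (a b c : Option Int) : pvOMin (pvOMin a b) c = pvOMin a (pvOMin b c) := by
  cases a <;> cases b <;> cases c <;> simp [pvOMin, min_assoc]

lemma min?_cons_pvOMin (d : Int) (l : List Int) :
    (d :: l).min? = pvOMin (some d) l.min? := by
  rw [List.min?_cons]
  cases h : l.min? <;> simp [pvOMin, Option.elim]

lemma pv_min?_eq (S T : List Int)
    (hST : ∀ s ∈ S, ∃ t ∈ T, t ≤ s) (hTS : ∀ t ∈ T, ∃ s ∈ S, s ≤ t) :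
    S.min? = T.min? := by
  cases hS : S.min? with
  | none =>
    rw [List.min?_eq_none_iff] at hS; subst hS
    cases hT : T.min? with
    | none => rfl
    | some mT =>
      obtain ⟨s, hs, -⟩ := hTS mT (List.min?_mem hT)
      cases hs
  | some mS =>
    have hmem := List.min?_mem hS
    have hle := (List.min?_eq_some_iff.mp hS).2
    cases hT : T.min? with
    | none =>
      rw [List.min?_eq_none_iff] at hT; subst hT
      obtain ⟨t, ht, -⟩ := hST mS hmem
      cases ht
    | some mT =>
      have hmemT := List.min?_mem hT
      have hleT := (List.min?_eq_some_iff.mp hT).2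
      obtain ⟨t, ht, hts⟩ := hST mS hmem
      obtain ⟨s, hs, hst⟩ := hTS mT hmemT
      have h1 : mT ≤ mS := le_trans (hleT t ht) hts
      have h2 : mS ≤ mT := le_trans (hle s hs) hst
      rw [le_antisymm h2 h1]

lemma pv_find?_sorted_min {p : Int → Bool} :
    ∀ (l : List Int), l.Pairwise (· < ·) → ∀ (r : Int), l.find? p = some r →
    ∀ x ∈ l, p x = true → r ≤ x := by
  intro l
  induction l with
  | nil => intro _ r hf; cases hf
  | cons a l ih =>
    intro hs r hf x hx hpx
    rcases List.pairwise_cons.mp hs with ⟨ha, hs'⟩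
    rw [List.find?_cons] at hf
    cases hpa : p a with
    | true =>
      simp only [hpa] at hf
      injection hf with hf; subst hf
      rcases List.mem_cons.mp hx with rfl | hx'
      · exact le_refl _
      · exact le_of_lt (ha x hx')
    | false =>
      simp only [hpa] at hf
      rcases List.mem_cons.mp hx with rfl | hx'
      · rw [hpx] at hpa; cases hpa
      · exact ih hs' r hf x hx' hpx

lemma pvInnerA_eq (cards : List Int) (left : Int) (mp : Option Int) (rights : List Int) :
    pvInnerA cards left mp rights =
      pvOMin mp ((rights.find? (fun r => PySem.List.pyGet? cards left == PySem.List.pyGet? cards r)).map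
        (fun r => r - left + 1)) := by
  induction rights with
  | nil => rfl
  | cons r rs ih =>
    rw [List.find?_cons]
    by_cases h : (PySem.List.pyGet? cards left == PySem.List.pyGet? cards r) = true
    · simp only [pvInnerA, h, if_pos, Option.map_some, pvOMin]
    · simp only [pvInnerA, h, Bool.false_eq_true, if_neg, not_false_iff, ih]

lemma pvFoldOMin (cards : List Int) (lefts : List Int) (mp : Option Int) :
    lefts.foldl (fun mp left => pvOMin mp (pvFirstDist cards left)) mp
      = pvOMin mp (lefts.filterMap (pvFirstDist cards)).min? := by
  induction lefts generalizing mp with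
  | nil => simp [pvOMin]
  | cons l ls ih =>
    rw [List.foldl_cons, ih, List.filterMap_cons]
    cases h : pvFirstDist cards l with
    | none => simp [pvOMin]
    | some d =>
      show pvOMin (pvOMin mp (some d)) (List.filterMap (pvFirstDist cards) ls).min?
        = pvOMin mp ((d :: List.filterMap (pvFirstDist cards) ls).min?)
      rw [min?_cons_pvOMin, ← pvOMin_assoc]

lemma pvA_eq_min? (cards : List Int) :
    minimum_card_pickup_brute_force cards = ((pvDistsA cards).min?).elim (-1) id := by
  unfold minimum_card_pickup_brute_force
  have hcong : (PySem.List.pyRange 0 (PySem.List.len cards - 1) 1).foldl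
      (fun mp left =>
        pvInnerA cards left mp (PySem.List.pyRange (left + 1) (PySem.List.len cards) 1)) none
    = (PySem.List.pyRange 0 (PySem.List.len cards - 1) 1).foldl
      (fun mp left => pvOMin mp (pvFirstDist cards left)) none := by
    apply PySem.List.foldl_congr_mem
    intro acc x _
    rw [pvInnerA_eq]
    rfl
  rw [hcong, pvFoldOMin, pvOMin_none_left]
  show (match (pvDistsA cards).min? with | none => (-1 : Int) | some m => m) = _
  cases (pvDistsA cards).min? <;> rfl

lemma pvDistsA_sound (cards : List Int) {dd : Int} (h : dd ∈ pvDistsA cards) :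
    ∃ j i, pvP cards j i ∧ dd = i - j + 1 := by
  unfold pvDistsA at h
  rcases List.mem_filterMap.mp h with ⟨left, hl, hfd⟩
  unfold pvFirstDist at hfd
  rcases Option.map_eq_some_iff.mp hfd with ⟨r, hfind, hdd⟩
  have hmem := List.mem_of_find?_eq_some hfind
  have hpred := List.find?_some hfind
  rw [PySem.List.mem_pyRange_one] at hmem hl
  simp only [PySem.List.len_eq] at hmem hl
  refine ⟨left, r, ⟨?_, ?_, ?_, ?_⟩, ?_⟩
  · omega
  · omega
  · omega
  · exact eq_of_beq hpred
  · omega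

lemma pvDistsA_complete (cards : List Int) {j i : Int} (h : pvP cards j i) :
    ∃ dd ∈ pvDistsA cards, dd ≤ i - j + 1 := by
  obtain ⟨h0, hji, hin, hv⟩ := h
  have hl : j ∈ PySem.List.pyRange 0 (PySem.List.len cards - 1) 1 := by
    rw [PySem.List.mem_pyRange_one]
    simp only [PySem.List.len_eq]
    omega
  have hi : i ∈ PySem.List.pyRange (j + 1) (PySem.List.len cards) 1 := by
    rw [PySem.List.mem_pyRange_one]
    simp only [PySem.List.len_eq]
    omega
  have hpi : (PySem.List.pyGet? cards j == PySem.List.pyGet? cards i) = true := beq_iff_eq.mpr hv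
  have hsome : ((PySem.List.pyRange (j + 1) (PySem.List.len cards) 1).find?
      (fun r => PySem.List.pyGet? cards j == PySem.List.pyGet? cards r)).isSome := by
    rw [List.find?_isSome]
    exact ⟨i, hi, hpi⟩
  obtain ⟨r, hr⟩ := Option.isSome_iff_exists.mp hsome
  have hrle := pv_find?_sorted_min _ (PySem.List.pairwise_lt_pyRange_one _ _) r hr i hi hpi
  refine ⟨r - j + 1, ?_, by omega⟩
  exact List.mem_filterMap.mpr ⟨j, hl, by rw [pvFirstDist, hr]; rfl⟩

lemma pvLastIn_append (p : List Int) (x c : Int) :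
    pvLastIn (p ++ [x]) c = if x = c then some (p.length : Int) else pvLastIn p c := by
  unfold pvLastIn
  rw [PySem.List.enumerate_append, List.reverse_append]
  simp only [PySem.List.enumerate_cons, PySem.List.enumerate_nil, List.reverse_cons,
    List.reverse_nil, List.nil_append, List.cons_append, List.find?_cons]
  by_cases h : x = c
  · subst h
    simp
  · have : ((0 + (p.length : Int), x).2 == c) = false := by
      simp [h]
    rw [this]
    simp [h]

lemma pvLastIn_spec (p : List Int) (c : Int) {j : Int} (h : pvLastIn p c = some j) :
    0 ≤ j ∧ j < (p.length : Int) ∧ PySem.List.pyGet? p j = some c := by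
  unfold pvLastIn at h
  rcases Option.map_eq_some_iff.mp h with ⟨pr, hf, hpr⟩
  have hm := List.mem_of_find?_eq_some hf
  rw [List.mem_reverse] at hm
  have hp := List.find?_some hf
  rcases (PySem.List.mem_enumerate_iff _ _ _).mp hm with ⟨k, hk, hpr2⟩
  subst hpr2
  simp only at hpr hp
  have hval : p[k] = c := eq_of_beq hp
  have hj : j = (k : Int) := by omega
  subst hj
  refine ⟨by omega, by omega, ?_⟩
  rw [PySem.List.pyGet?_natCast]
  rw [List.getElem?_eq_getElem hk, hval]

lemma pvLastIn_ge (p : List Int) : ∀ (c j : Int),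
    0 ≤ j → j < (p.length : Int) → PySem.List.pyGet? p j = some c →
    ∃ j', pvLastIn p c = some j' ∧ j ≤ j' := by
  induction p using List.reverseRecOn with
  | nil => intro c j h0 hj _; simp at hj; omega
  | append_singleton t y ih =>
    intro c j h0 hj hv
    rw [pvLastIn_append]
    by_cases hy : y = c
    · refine ⟨(t.length : Int), by rw [if_pos hy], ?_⟩
      simp only [List.length_append, List.length_cons, List.length_nil] at hj
      omega
    · have hjt : j < (t.length : Int) := by
        simp only [List.length_append, List.length_cons, List.length_nil] at hj
        by_contra hcon
        have hjeq : j = (t.length : Int) := by omega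
        rw [hjeq] at hv
        rw [show ((t.length : Int)) = ((t.length : Int) + (0:Nat)) by simp] at hv
        rw [PySem.List.pyGet?_append_right] at hv
        simp at hv
        exact hy hv
      have hvt : PySem.List.pyGet? t j = some c := by
        rw [PySem.List.pyGet?_of_nonneg _ h0] at hv
        rw [PySem.List.pyGet?_of_nonneg _ h0]
        rw [List.getElem?_append_left (by omega)] at hv
        exact hv
      obtain ⟨j', hj', hle⟩ := ih c j h0 hjt hvt
      exact ⟨j', by rw [if_neg hy]; exact hj', hle⟩

lemma pvDictOf_append (p : List Int) (x : Int) :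
    pvDictOf (p ++ [x]) = (pvDictOf p).insert x (p.length : Int) := by
  unfold pvDictOf
  rw [PySem.List.enumerate_append, List.foldl_append]
  simp [PySem.List.enumerate_cons, PySem.List.enumerate_nil]

lemma pvDictOf_get? (p : List Int) (c : Int) :
    (pvDictOf p).get? c = pvLastIn p c := by
  induction p using List.reverseRecOn with
  | nil => rfl
  | append_singleton t y ih =>
    rw [pvDictOf_append, pvLastIn_append, PySem.Dict.get?_insert]
    by_cases h : y = c
    · rw [if_pos h, if_pos h.symm]
    · rw [if_neg h, if_neg (fun hc => h hc.symm), ih]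

lemma pvB_fold (q : List Int) : ∀ (p : List Int) (b : Int),
    ((PySem.List.enumerate q (p.length : Int)).foldl pvStepB (pvDictOf p, b)).2
      = (pvDists p q).foldl pvBmin b := by
  induction q with
  | nil => intro p b; simp [PySem.List.enumerate_nil, pvDists]
  | cons x q' ih =>
    intro p b
    rw [PySem.List.enumerate_cons, List.foldl_cons]
    have hlen : ((p.length : Int) + 1) = (((p ++ [x]).length : Int)) := by
      simp
    cases hL : pvLastIn p x with
    | none =>
      have hstep : pvStepB (pvDictOf p, b) ((p.length : Int), x) = (pvDictOf (p ++ [x]), b) := by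
        simp only [pvStepB, pvDictOf_get?, hL, pvDictOf_append]
      rw [hstep, hlen, ih (p ++ [x]) b]
      rw [pvDists, hL]
      rfl
    | some j =>
      have hstep : pvStepB (pvDictOf p, b) ((p.length : Int), x)
          = (pvDictOf (p ++ [x]), pvBmin b ((p.length : Int) - j + 1)) := by
        simp only [pvStepB, pvDictOf_get?, hL, pvDictOf_append, pvBmin]
      rw [hstep, hlen, ih (p ++ [x]) (pvBmin b ((p.length : Int) - j + 1))]
      rw [pvDists, hL]
      rfl

lemma pvDists_nonneg (q : List Int) : ∀ p, ∀ dd ∈ pvDists p q, 0 ≤ dd := by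
  induction q with
  | nil => intro p dd h; cases h
  | cons x q' ih =>
    intro p dd h
    rw [pvDists] at h
    rcases List.mem_append.mp h with h1 | h2
    · cases hL : pvLastIn p x with
      | none => rw [hL] at h1; cases h1
      | some j =>
        rw [hL] at h1
        rcases List.mem_singleton.mp h1 with rfl
        obtain ⟨hj0, hjl, -⟩ := pvLastIn_spec p x hL
        omega
    · exact ih (p ++ [x]) dd h2

lemma pvBmin_aux (ds : List Int) : ∀ (a : Int), 0 ≤ a → (∀ x ∈ ds, 0 ≤ x) →
    ds.foldl pvBmin a = ds.foldl min a := by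
  induction ds with
  | nil => intro a _ _; rfl
  | cons d ds ih =>
    intro a ha hds
    have hd0 : 0 ≤ d := hds d (List.mem_cons_self ..)
    rw [List.foldl_cons, List.foldl_cons]
    have h1 : pvBmin a d = min a d := by
      unfold pvBmin
      have : (a == (-1 : Int)) = false := by simp; omega
      rw [this]
      simp only [Bool.false_or]
      by_cases hd : d < a
      · rw [if_pos (by simpa using hd)]
        omega
      · rw [if_neg (by simpa using hd)]
        omega
    rw [h1, ih (min a d) (by omega) (fun x hx => hds x (List.mem_cons_of_mem _ hx))]

lemma pvBmin_fold_min? (ds : List Int) (h : ∀ x ∈ ds, 0 ≤ x) :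
    ds.foldl pvBmin (-1) = (ds.min?).elim (-1) id := by
  cases ds with
  | nil => rfl
  | cons d ds =>
    rw [List.foldl_cons]
    have hd : pvBmin (-1) d = d := by unfold pvBmin; simp
    rw [hd, pvBmin_aux ds d (h d (List.mem_cons_self ..))
      (fun x hx => h x (List.mem_cons_of_mem _ hx)), List.min?_cons']
    rfl

lemma pvB_eq_min? (cards : List Int) :
    minimum_card_pickup_brute_force_alt cards = ((pvDists [] cards).min?).elim (-1) id := by
  unfold minimum_card_pickup_brute_force_alt
  have h := pvB_fold cards [] (-1)
  simp only [List.length_nil, Nat.cast_zero] at h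
  have h0 : (pvDictOf [] : PySem.Dict Int Int) = PySem.Dict.empty := rfl
  rw [h0] at h
  rw [h, pvBmin_fold_min? _ (pvDists_nonneg cards [])]

lemma pvDists_sound (q : List Int) : ∀ p, ∀ dd ∈ pvDists p q,
    ∃ j i, pvP (p ++ q) j i ∧ dd = i - j + 1 := by
  induction q with
  | nil => intro p dd h; cases h
  | cons x q' ih =>
    intro p dd h
    rw [pvDists] at h
    rcases List.mem_append.mp h with h1 | h2
    · cases hL : pvLastIn p x with
      | none => rw [hL] at h1; cases h1
      | some j =>
        rw [hL] at h1
        rcases List.mem_singleton.mp h1 with rfl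
        obtain ⟨hj0, hjl, hjv⟩ := pvLastIn_spec p x hL
        refine ⟨j, (p.length : Int), ⟨hj0, hjl, ?_, ?_⟩, by ring⟩
        · simp only [List.length_append, List.length_cons]
          push_cast
          omega
        · rw [PySem.List.pyGet?_append_length]
          rw [PySem.List.pyGet?_of_nonneg _ hj0] at hjv
          rw [PySem.List.pyGet?_of_nonneg _ hj0]
          rw [List.getElem?_append_left (by omega)]
          exact hjv
    · obtain ⟨j, i, hP, hdd⟩ := ih (p ++ [x]) dd h2
      rw [List.append_assoc, List.singleton_append] at hP
      exact ⟨j, i, hP, hdd⟩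

lemma pvDists_complete (q : List Int) : ∀ (p : List Int) (j i : Int),
    0 ≤ j → j < i → (p.length : Int) ≤ i → i < ((p ++ q).length : Int) →
    PySem.List.pyGet? (p ++ q) j = PySem.List.pyGet? (p ++ q) i →
    ∃ dd ∈ pvDists p q, dd ≤ i - j + 1 := by
  induction q with
  | nil =>
    intro p j i _ _ h3 h4 _
    simp only [List.append_nil] at h4
    omega
  | cons x q' ih =>
    intro p j i h0 h1 h3 h4 hv
    rcases eq_or_lt_of_le h3 with heq | hlt
    · -- i = p.length : the head entry of pvDists covers it
      have hix : PySem.List.pyGet? (p ++ x :: q') i = some x := by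
        rw [← heq, PySem.List.pyGet?_append_length]
      have hjx : PySem.List.pyGet? p j = some x := by
        rw [hix] at hv
        rw [PySem.List.pyGet?_of_nonneg _ h0] at hv
        rw [PySem.List.pyGet?_of_nonneg _ h0]
        rw [List.getElem?_append_left (by omega)] at hv
        exact hv
      obtain ⟨j', hj', hle⟩ := pvLastIn_ge p x j h0 (by omega) hjx
      refine ⟨(p.length : Int) - j' + 1, ?_, by omega⟩
      rw [pvDists, hj']
      exact List.mem_append_left _ (List.mem_singleton.mpr rfl)
    · -- i > p.length : recurse into the tail
      have hassoc : p ++ x :: q' = (p ++ [x]) ++ q' := by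
        rw [List.append_assoc, List.singleton_append]
      rw [hassoc] at hv h4
      obtain ⟨dd, hdd, hdle⟩ := ih (p ++ [x]) j i h0 h1
        (by simp only [List.length_append, List.length_cons, List.length_nil]; push_cast; omega)
        h4 hv
      refine ⟨dd, ?_, hdle⟩
      rw [pvDists]
      exact List.mem_append_right _ hdd

lemma pv_min?_A_eq_B (cards : List Int) :
    (pvDistsA cards).min? = (pvDists [] cards).min? := by
  apply pv_min?_eq
  · intro s hs
    obtain ⟨j, i, hP, rfl⟩ := pvDistsA_sound cards hs
    obtain ⟨h0, h1, h2, h3⟩ := hP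
    obtain ⟨dd, hdd, hle⟩ := pvDists_complete cards [] j i h0 h1
      (by simp; omega) (by simpa using h2) (by simpa using h3)
    exact ⟨dd, hdd, hle⟩
  · intro t ht
    obtain ⟨j, i, hP, rfl⟩ := pvDists_sound cards [] t ht
    rw [List.nil_append] at hP
    obtain ⟨dd, hdd, hle⟩ := pvDistsA_complete cards hP
    exact ⟨dd, hdd, hle⟩

-- ===== VERDICT (by name: the statement is the Claim_ definition above) =====
theorem minimum_card_pickup_brute_force_spec : Claim_equal_minimum_card_pickup_brute_force := by
  intro cards _
  show _ = _
  rw [pvA_eq_min? cards, pvB_eq_min? cards, pv_min?_A_eq_B cards]
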